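-- pv_equiv track=rewrite | github.com/gianpy15/HandTracking | source/data/datasets/crop/jsonhands_dataset_manager.py | __remove_lr
-- ===== SOURCE A (Python) =====
-- def __remove_lr(name):
--     split = name.split("_")
--     ris = ""
--     tot = len(split) - 1
--     for i in range(tot):
--         ris += split[i]
--         if i != tot - 1:
--             ris += "_"
--     return ris
-- ===== SOURCE B (Python) =====
-- def __remove_lr(name):
--     idx = name.rfind("_")
--     return name[:idx] if idx != -1 else ""
-- ===== Notes on version B (the rewrite author's own statement) =====
-- stated objective: idiomatic
-- what changed: B locates the last underscore with rfind and returns one slice instead of splitting into all segments and rebuilding them with an index loop.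
import Mathlib
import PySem

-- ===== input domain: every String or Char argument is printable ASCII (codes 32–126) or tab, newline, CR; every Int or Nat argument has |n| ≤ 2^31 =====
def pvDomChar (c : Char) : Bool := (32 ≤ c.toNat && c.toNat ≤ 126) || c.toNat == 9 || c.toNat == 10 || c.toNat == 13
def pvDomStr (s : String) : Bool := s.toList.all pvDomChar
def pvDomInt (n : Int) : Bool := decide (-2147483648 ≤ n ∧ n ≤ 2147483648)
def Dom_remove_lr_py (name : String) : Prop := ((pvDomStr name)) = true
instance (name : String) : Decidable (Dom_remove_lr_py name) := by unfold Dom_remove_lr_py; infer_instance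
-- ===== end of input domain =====

-- B replaces A's split-and-rebuild index loop by rfind of the last underscore and one slice (idiomatic; same O(n) cost).

-- ===== PORT A =====
def remove_lr_py (name : String) : String :=
  let split := PySem.Chars.splitOn name.toList ['_']
  let tot : Int := (split.length : Int) - 1
  let ris := (PySem.List.pyRange 0 tot 1).foldl (fun ris i =>
      let ris := ris ++ (PySem.List.pyGetD split i [])
      if i ≠ tot - 1 then ris ++ ['_'] else ris) ([] : List Char)
  String.ofList ris

-- ===== PORT B =====
def remove_lr_py_alt (name : String) : String :=
  let idx := PySem.Str.rfind name "_"
  if idx ≠ -1 then PySem.Str.slice name none (some idx) else ""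

-- ===== PRECONDITION & SPEC =====
def Spec_remove_lr_py (name : String) (out : String) : Prop := out = remove_lr_py_alt name
instance (name : String) (out : String) : Decidable (Spec_remove_lr_py name out) := by unfold Spec_remove_lr_py; infer_instance

-- ===== CLAIM (what is proved, stated in full; the proofs are below) =====
def Claim_equal_remove_lr_py : Prop := ∀ (name : String), Dom_remove_lr_py name → Spec_remove_lr_py name (remove_lr_py name)

-- ===== LEMMAS AND PROOFS =====

/-- Spec recursion for Python's split("_") on a char list. -/
def pvSp : List Char → List (List Char)
  | [] => [[]]
  | c :: rest => if c = '_' then [] :: pvSp rest else (pvSp rest).modifyHead (c :: ·)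

/-- The common value: everything before the last underscore, [] if none. -/
def pvG : List Char → List Char
  | [] => []
  | c :: rest => if '_' ∈ rest then c :: pvG rest else []

theorem pvSp_ne_nil (l : List Char) : pvSp l ≠ [] := by
  cases l with
  | nil => simp [pvSp]
  | cons c rest =>
      simp only [pvSp]
      split
      · simp
      · cases h : pvSp rest with
        | nil => exact absurd h (pvSp_ne_nil rest)
        | cons a t => simp [List.modifyHead]

theorem pvSp_no_underscore (l : List Char) (h : '_' ∉ l) : pvSp l = [l] := by
  induction l with
  | nil => rfl
  | cons c rest ih =>
      simp only [List.mem_cons, not_or] at h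
      simp [pvSp, Ne.symm h.1, ih h.2, List.modifyHead]

theorem pvSp_two_of_mem (l : List Char) (h : '_' ∈ l) :
    ∃ l1 l2 t, pvSp l = l1 :: l2 :: t := by
  induction l with
  | nil => simp at h
  | cons c rest ih =>
      by_cases hc : c = '_'
      · cases hl : pvSp rest with
        | nil => exact absurd hl (pvSp_ne_nil rest)
        | cons a t => exact ⟨[], a, t, by simp [pvSp, hc, hl]⟩
      · have hr : '_' ∈ rest := by
          rcases List.mem_cons.mp h with h1 | h2
          · exact absurd h1.symm hc
          · exact h2
        obtain ⟨l1, l2, t, hl⟩ := ih hr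
        exact ⟨c :: l1, l2, t, by simp [pvSp, hc, hl, List.modifyHead]⟩

theorem pvJoin_cons (p m : List Char) (ms : List (List Char)) :
    PySem.Chars.join ['_'] (p :: m :: ms) = p ++ '_' :: PySem.Chars.join ['_'] (m :: ms) := by
  rw [PySem.Chars.join_cons_cons]
  simp

theorem pvPrefix_underscore (c : Char) (rest : List Char) :
    List.isPrefixOf ['_'] (c :: rest) = ('_' == c) := by
  simp [List.isPrefixOf]

theorem pvSplitOn_go (fuel : Nat) :
    ∀ (l cur : List Char) (acc : List (List Char)), l.length < fuel →
      PySem.Chars.splitOn.go ['_'] fuel l cur acc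
        = acc.reverse ++ (pvSp l).modifyHead (cur.reverse ++ ·) := by
  induction fuel with
  | zero => intro l cur acc h; omega
  | succ fuel ih =>
      intro l cur acc h
      cases l with
      | nil =>
          show (cur.reverse :: acc).reverse = _
          simp [pvSp, List.modifyHead]
      | cons c rest =>
          show (if List.isPrefixOf ['_'] (c :: rest)
                then PySem.Chars.splitOn.go ['_'] fuel (List.drop ['_'].length (c :: rest)) [] (cur.reverse :: acc)
                else PySem.Chars.splitOn.go ['_'] fuel rest (c :: cur) acc) = _
          rw [pvPrefix_underscore]
          by_cases hc : c = '_'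
          · rw [if_pos (by simp [hc])]
            simp only [List.length_cons, List.length_nil, Nat.zero_add, List.drop_succ_cons,
              List.drop_zero]
            rw [ih rest [] (cur.reverse :: acc) (by simpa using Nat.lt_of_succ_lt_succ h)]
            simp only [pvSp, hc]
            cases hl : pvSp rest with
            | nil => exact absurd hl (pvSp_ne_nil rest)
            | cons a t => simp [List.modifyHead]
          · rw [if_neg (by simp; exact fun h' => absurd h'.symm hc)]
            rw [ih rest (c :: cur) acc (by simpa using Nat.lt_of_succ_lt_succ h)]
            simp only [pvSp, hc, if_false]
            cases hl : pvSp rest with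
            | nil => exact absurd hl (pvSp_ne_nil rest)
            | cons a t => simp [List.modifyHead]

theorem pvSplitOn_eq (s : List Char) : PySem.Chars.splitOn s ['_'] = pvSp s := by
  rw [PySem.Chars.splitOn, pvSplitOn_go (s.length + 1) s [] [] (by omega)]
  cases hl : pvSp s with
  | nil => exact absurd hl (pvSp_ne_nil s)
  | cons a t => simp [List.modifyHead]

/-- A's join of all but the last piece equals pvG. -/
theorem pvJoin_dropLast_sp (s : List Char) :
    PySem.Chars.join ['_'] ((pvSp s).dropLast) = pvG s := by
  induction s with
  | nil => simp [pvSp, pvG, PySem.Chars.join_nil]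
  | cons c rest ih =>
      by_cases hr : '_' ∈ rest
      · obtain ⟨l1, l2, t, hsp⟩ := pvSp_two_of_mem rest hr
        rw [hsp] at ih
        by_cases hc : c = '_'
        · have hsp' : pvSp (c :: rest) = [] :: l1 :: l2 :: t := by
            rw [pvSp, if_pos hc, hsp]
          rw [hsp', pvG, if_pos hr]
          simp only [List.dropLast_cons₂] at ih ⊢
          cases hd : (l2 :: t).dropLast with
          | nil =>
              rw [hd] at ih
              rw [PySem.Chars.join_singleton] at ih
              rw [pvJoin_cons, PySem.Chars.join_singleton, ih]
              simp [hc]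
          | cons m ms =>
              rw [hd] at ih
              rw [pvJoin_cons, ih]
              simp [hc]
        · have hsp' : pvSp (c :: rest) = (c :: l1) :: l2 :: t := by
            rw [pvSp, if_neg hc, hsp]
            rfl
          rw [hsp', pvG, if_pos hr]
          simp only [List.dropLast_cons₂] at ih ⊢
          cases hd : (l2 :: t).dropLast with
          | nil =>
              rw [hd] at ih
              rw [PySem.Chars.join_singleton] at ih ⊢
              rw [ih]
          | cons m ms =>
              rw [hd] at ih
              rw [pvJoin_cons] at ih ⊢
              rw [← ih]
              simp
      · have hs := pvSp_no_underscore rest hr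
        by_cases hc : c = '_'
        · simp [pvSp, hc, hs, pvG, hr, PySem.Chars.join_singleton]
        · simp [pvSp, hc, hs, pvG, hr, List.modifyHead, PySem.Chars.join_nil]

/-- A's index loop over the pieces equals the join of all but the last piece. -/
theorem pvFold_go (ps : List (List Char)) (x : List Char) :
    ∀ (k : Nat) (acc : List Char), k ≤ ps.length →
      (PySem.List.pyRange ((k : Nat) : Int) ((ps.length : Nat) : Int) 1).foldl
        (fun ris i =>
          let ris := ris ++ (PySem.List.pyGetD (ps ++ [x]) i [])
          if i ≠ ((ps.length : Nat) : Int) - 1 then ris ++ ['_'] else ris) acc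
        = acc ++ PySem.Chars.join ['_'] (ps.drop k) := by
  intro k acc hk
  induction hn : ps.length - k generalizing k acc with
  | zero =>
      have hkl : k = ps.length := by omega
      subst hkl
      rw [PySem.List.pyRange_one_eq_nil (by omega)]
      simp [PySem.Chars.join_nil]
  | succ n ihn =>
      have hklt : k < ps.length := by omega
      rw [PySem.List.pyRange_one_cons (by exact_mod_cast hklt)]
      simp only [List.foldl_cons]
      have hget : PySem.List.pyGetD (ps ++ [x]) ((k : Nat) : Int) [] = ps[k] := by
        rw [PySem.List.pyGetD_natCast]
        simp [List.getElem?_append_left hklt, hklt]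
      have hdrop : ps.drop k = ps[k] :: ps.drop (k + 1) := List.drop_eq_getElem_cons hklt
      have hcast : ((k : Nat) : Int) + 1 = (((k + 1 : Nat) : Nat) : Int) := by push_cast; ring
      by_cases hlast : k = ps.length - 1
      · have hcond : ¬ (((k : Nat) : Int) ≠ ((ps.length : Nat) : Int) - 1) := by
          simp only [ne_eq, not_not]; omega
        simp only [hget, if_neg hcond]
        rw [hcast, ihn (k+1) _ (by omega) (by omega)]
        have hnil : ps.drop (k+1) = [] := List.drop_eq_nil_of_le (by omega)
        rw [hdrop, hnil, PySem.Chars.join_singleton]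
        simp
      · have hcond : (((k : Nat) : Int) ≠ ((ps.length : Nat) : Int) - 1) := by omega
        simp only [hget, if_pos hcond]
        rw [hcast, ihn (k+1) _ (by omega) (by omega)]
        rw [hdrop]
        cases hd : ps.drop (k+1) with
        | nil =>
            exact absurd hd (by simp only [List.drop_eq_nil_iff]; omega)
        | cons b t => rw [pvJoin_cons]; simp

/-- rfind recursion on a cons cell. -/
theorem pvRfind_go_cons (c : Char) (rest sub : List Char) :
    ∀ n, PySem.Chars.rfind.go (c :: rest) sub (n + 1)
      = (if PySem.Chars.rfind.go rest sub n ≠ -1 then PySem.Chars.rfind.go rest sub n + 1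
         else if List.isPrefixOf sub (c :: rest) then 0 else -1) := by
  intro n
  induction n with
  | zero =>
      show (if List.isPrefixOf sub (List.drop 1 (c :: rest)) then ((0:Int)+1)
            else PySem.Chars.rfind.go (c :: rest) sub 0) = _
      show (if List.isPrefixOf sub rest then ((0:Int)+1)
            else if List.isPrefixOf sub (c :: rest) then 0 else -1) = _
      show _ = (if (if List.isPrefixOf sub rest then (0:Int) else -1) ≠ -1
                then (if List.isPrefixOf sub rest then (0:Int) else -1) + 1
                else if List.isPrefixOf sub (c :: rest) then 0 else -1)
      by_cases hp : List.isPrefixOf sub rest = true <;> simp [hp]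
  | succ n ih =>
      show (if List.isPrefixOf sub (List.drop (n + 1 + 1) (c :: rest)) then ((n:Int)+1+1)
            else PySem.Chars.rfind.go (c :: rest) sub (n + 1)) = _
      conv_rhs =>
        rw [show PySem.Chars.rfind.go rest sub (n + 1)
              = (if List.isPrefixOf sub (List.drop (n + 1) rest) then ((n:Int)+1)
                 else PySem.Chars.rfind.go rest sub n) from rfl]
      simp only [List.drop_succ_cons]
      by_cases hp : List.isPrefixOf sub (List.drop (n + 1) rest) = true
      · rw [if_pos hp, if_pos hp]
        have hne : ((n : Int) + 1) ≠ -1 := by omega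
        rw [if_pos hne]
      · have hp' : ¬ (List.isPrefixOf sub (List.drop (n + 1) rest) = true) := hp
        rw [if_neg hp', if_neg hp']
        exact ih

theorem pvRfind_cons (c : Char) (rest sub : List Char) :
    PySem.Chars.rfind (c :: rest) sub
      = (if PySem.Chars.rfind rest sub ≠ -1 then PySem.Chars.rfind rest sub + 1
         else if List.isPrefixOf sub (c :: rest) then 0 else -1) := by
  rw [PySem.Chars.rfind, PySem.Chars.rfind]
  exact pvRfind_go_cons c rest sub rest.length

theorem pvRfind_ge (l sub : List Char) : -1 ≤ PySem.Chars.rfind l sub := by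
  induction l with
  | nil =>
      rw [PySem.Chars.rfind]
      show -1 ≤ (if List.isPrefixOf sub ([] : List Char) then (0:Int) else -1)
      split <;> omega
  | cons c rest ih =>
      rw [pvRfind_cons]
      split
      · omega
      · split <;> omega
theorem pvRfind_underscore_neg_iff (l : List Char) :
    PySem.Chars.rfind l ['_'] = -1 ↔ '_' ∉ l := by
  induction l with
  | nil =>
      rw [PySem.Chars.rfind]
      show (if List.isPrefixOf ['_'] ([] : List Char) then (0:Int) else -1) = -1 ↔ _
      simp [List.isPrefixOf]
  | cons c rest ih =>
      rw [pvRfind_cons]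
      by_cases hr : PySem.Chars.rfind rest ['_'] = -1
      · rw [if_neg (by simpa using hr), pvPrefix_underscore]
        by_cases hc : c = '_'
        · simp [hc]
        · have hb : ('_' == c) = false := by simp; exact fun h => absurd h.symm hc
          simp [hb, ih.mp hr, Ne.symm hc]
      · rw [if_pos hr]
        have hge := pvRfind_ge rest ['_']
        constructor
        · intro h; omega
        · intro h
          exact absurd (ih.mpr (fun hm => h (List.mem_cons_of_mem c hm))) hr


/-- B's take up to the last underscore equals pvG. -/
theorem pvTake_rfind (l : List Char) (h : PySem.Chars.rfind l ['_'] ≠ -1) :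
    l.take (PySem.Chars.rfind l ['_']).toNat = pvG l := by
  induction l with
  | nil => exact absurd ((pvRfind_underscore_neg_iff []).mpr (by simp)) h
  | cons c rest ih =>
      rw [pvRfind_cons] at *
      by_cases hr : PySem.Chars.rfind rest ['_'] = -1
      · have hmem : '_' ∉ rest := (pvRfind_underscore_neg_iff rest).mp hr
        rw [if_neg (by simpa using hr)] at h ⊢
        have hpre : List.isPrefixOf ['_'] (c :: rest) = true := by
          by_contra hp
          rw [if_neg hp] at h
          exact h rfl
        rw [if_pos hpre]
        simp [pvG, hmem]
      · have hmem : '_' ∈ rest := by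
          by_contra hm
          exact hr ((pvRfind_underscore_neg_iff rest).mpr hm)
        have hge := pvRfind_ge rest ['_']
        rw [if_pos hr] at h ⊢
        have htn : (PySem.Chars.rfind rest ['_'] + 1).toNat
            = (PySem.Chars.rfind rest ['_']).toNat + 1 := by omega
        rw [htn, List.take_succ_cons, pvG, if_pos hmem, ih hr]

theorem pvA_eq_g (name : String) :
    remove_lr_py name = String.ofList (pvG name.toList) := by
  rw [remove_lr_py]
  simp only [pvSplitOn_eq]
  have hne : pvSp name.toList ≠ [] := pvSp_ne_nil name.toList
  have hrepr : pvSp name.toList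
      = (pvSp name.toList).dropLast ++ [(pvSp name.toList).getLast hne] :=
    (List.dropLast_append_getLast hne).symm
  rw [hrepr]
  have hlen : ((((pvSp name.toList).dropLast
        ++ [(pvSp name.toList).getLast hne]).length : Nat) : Int) - 1
      = (((pvSp name.toList).dropLast.length : Nat) : Int) := by simp
  rw [hlen]
  rw [show ((0 : Int)) = (((0 : Nat) : Nat) : Int) from rfl]
  rw [pvFold_go ((pvSp name.toList).dropLast) ((pvSp name.toList).getLast hne) 0 [] (by omega)]
  rw [List.drop_zero, List.nil_append, pvJoin_dropLast_sp]

theorem pvB_eq_g (name : String) :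
    remove_lr_py_alt name = String.ofList (pvG name.toList) := by
  rw [remove_lr_py_alt]
  simp only [PySem.Str.rfind_eq, show ("_" : String).toList = ['_'] from rfl]
  by_cases h : PySem.Chars.rfind name.toList ['_'] = -1
  · have hmem : '_' ∉ name.toList := (pvRfind_underscore_neg_iff _).mp h
    have hg : pvG name.toList = [] := by
      cases hc : name.toList with
      | nil => rfl
      | cons c rest =>
          rw [pvG]
          rw [hc] at hmem
          simp only [List.mem_cons, not_or] at hmem
          simp [hmem.2]
    rw [if_neg (by simpa using h), hg]
  · rw [if_pos (by simpa using h)]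
    have hge := pvRfind_ge name.toList ['_']
    have h0 : 0 ≤ PySem.Chars.rfind name.toList ['_'] := by omega
    rw [PySem.Str.slice]
    congr 1
    rw [PySem.Chars.slice_eq_listSlice, PySem.List.slice_to _ h0]
    exact pvTake_rfind name.toList h

-- ===== VERDICT (by name: the statement is the Claim_ definition above) =====
theorem remove_lr_py_spec : Claim_equal_remove_lr_py := by
  intro name _
  unfold Spec_remove_lr_py
  rw [pvA_eq_g, pvB_eq_g]
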